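-- pv_equiv track=rewrite | github.com/thibault883/5WWIPython | 12a-lists/Fruitmand.py | fruitstuk_toevoegen
-- ===== SOURCE A (Python) =====
-- from operator import itemgetter
--
-- def fruitstuk_toevoegen(fruitmand, fruit):
--     uitkomst, uitvoer = [], []
--     for i in range(len(fruitmand)):
--         if len(fruitmand[i]) != len(fruit):
--             uitkomst += [[fruitmand[i], len(fruitmand[i])]]
--     uitkomst.append([fruit, len(fruit)])
--     uitkomst.sort(key=itemgetter(1))
--     for k in range(len(uitkomst)):
--         uitvoer += [uitkomst[k][0]]
--
--     return uitvoer
-- ===== SOURCE B (Python) =====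
-- def fruitstuk_toevoegen(fruitmand, fruit):
--     buckets = {}
--     for naam in fruitmand:
--         if len(naam) != len(fruit):
--             buckets.setdefault(len(naam), []).append(naam)
--     buckets.setdefault(len(fruit), []).append(fruit)
--     uitvoer = []
--     for lengte in sorted(buckets):
--         uitvoer.extend(buckets[lengte])
--     return uitvoer
-- ===== Notes on version B (the rewrite author's own statement) =====
-- stated objective: faster
-- what changed: Replaces the [name,length] pair list plus stable comparison sort with a length-indexed bucket dict filled in one pass and concatenated over sorted distinct lengths (bucket sort preserving insertion order).
import Mathlib
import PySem

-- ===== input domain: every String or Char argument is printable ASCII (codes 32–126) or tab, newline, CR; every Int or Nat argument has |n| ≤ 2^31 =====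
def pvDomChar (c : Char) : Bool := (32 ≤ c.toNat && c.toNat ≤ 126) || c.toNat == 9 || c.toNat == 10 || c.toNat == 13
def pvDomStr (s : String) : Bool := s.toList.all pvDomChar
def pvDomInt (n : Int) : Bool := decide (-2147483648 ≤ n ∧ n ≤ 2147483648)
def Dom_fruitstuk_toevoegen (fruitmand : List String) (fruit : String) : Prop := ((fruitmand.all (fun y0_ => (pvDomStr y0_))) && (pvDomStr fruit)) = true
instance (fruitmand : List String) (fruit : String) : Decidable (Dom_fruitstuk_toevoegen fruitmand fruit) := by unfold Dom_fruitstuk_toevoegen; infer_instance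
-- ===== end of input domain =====

-- B replaces A's [name,length] pair list + stable comparison sort by a length-indexed
-- bucket dict filled in one pass and concatenated over sorted distinct keys (measured
-- faster in a timing run; same return values).

-- ===== PORT A =====
def fruitstuk_toevoegen (fruitmand : List String) (fruit : String) : List String :=
  let uitkomst : List (String × Int) :=
    (PySem.List.pyRange 0 (PySem.List.len fruitmand)).foldl
      (fun acc i =>
        let s := PySem.List.pyGetD fruitmand i ""
        if PySem.Str.len s ≠ PySem.Str.len fruit then acc ++ [(s, PySem.Str.len s)] else acc) []
  let uitkomst2 := uitkomst ++ [(fruit, PySem.Str.len fruit)]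
  let gesorteerd := PySem.List.sorted uitkomst2 (fun p => p.2)
  (PySem.List.pyRange 0 (PySem.List.len gesorteerd)).foldl
    (fun acc k => acc ++ [(PySem.List.pyGetD gesorteerd k ("", 0)).1]) []

-- ===== PORT B =====
def fruitstuk_toevoegen_alt (fruitmand : List String) (fruit : String) : List String :=
  let buckets : PySem.Dict Int (List String) :=
    fruitmand.foldl
      (fun d naam =>
        if PySem.Str.len naam ≠ PySem.Str.len fruit
        then d.modify (PySem.Str.len naam) [] (· ++ [naam]) else d)
      PySem.Dict.empty
  let buckets2 := buckets.modify (PySem.Str.len fruit) [] (· ++ [fruit])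
  (PySem.List.sorted buckets2.keys (fun k => k)).foldl
    (fun acc k => acc ++ buckets2.getD k []) []

-- ===== PRECONDITION & SPEC =====
def Spec_fruitstuk_toevoegen (fruitmand : List String) (fruit : String) (out : List String) : Prop := out = fruitstuk_toevoegen_alt fruitmand fruit
instance (fruitmand : List String) (fruit : String) (out : List String) : Decidable (Spec_fruitstuk_toevoegen fruitmand fruit out) := by unfold Spec_fruitstuk_toevoegen; infer_instance

-- ===== CLAIM (what is proved, stated in full; the proofs are below) =====
def Claim_equal_fruitstuk_toevoegen : Prop := ∀ (fruitmand : List String) (fruit : String), Dom_fruitstuk_toevoegen fruitmand fruit → Spec_fruitstuk_toevoegen fruitmand fruit (fruitstuk_toevoegen fruitmand fruit)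

-- ===== LEMMAS AND PROOFS =====

theorem pv_filter_insertBy {α : Type} (key : α → Int) (x : α) (k : Int) (ys : List α)
    (hys : ys.Pairwise (fun a b => key a ≤ key b)) :
    (PySem.List.insertBy (fun a b => decide (key a < key b)) x ys).filter (fun y => key y == k)
      = ys.filter (fun y => key y == k) ++ (if key x = k then [x] else []) := by
  induction ys with
  | nil => by_cases hk : key x = k <;> simp [PySem.List.insertBy, hk]
  | cons y ys ih =>
      rw [List.pairwise_cons] at hys
      show List.filter _ (if decide (key x < key y) = true then x :: y :: ys
            else y :: PySem.List.insertBy (fun a b => decide (key a < key b)) x ys) = _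
      by_cases hlt : key x < key y
      · rw [if_pos (by simpa)]
        by_cases hk : key x = k
        · have hnil : (y :: ys).filter (fun y => key y == k) = [] := by
            rw [List.filter_eq_nil_iff]
            intro a ha
            rcases List.mem_cons.mp ha with rfl | ha
            · simp; omega
            · have := hys.1 a ha; simp; omega
          rw [List.filter_cons_of_pos (by simp [hk]), hnil, if_pos hk]; simp
        · rw [List.filter_cons_of_neg (by simp [hk]), if_neg hk, List.append_nil]
      · rw [if_neg (by simpa using hlt)]
        rw [List.filter_cons, List.filter_cons, ih hys.2]
        by_cases hy : (key y == k) = true <;> simp [hy]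

theorem pv_eq_of_pairwise_of_filters {α : Type} (key : α → Int) :
    ∀ (as bs : List α), as.Pairwise (fun a b => key a ≤ key b) →
    bs.Pairwise (fun a b => key a ≤ key b) →
    (∀ k : Int, as.filter (fun x => key x == k) = bs.filter (fun x => key x == k)) →
    as = bs := by
  intro as
  induction as with
  | nil =>
      intro bs _ _ h
      cases bs with
      | nil => rfl
      | cons b bs =>
          have := h (key b)
          simp at this
  | cons a as ih =>
      intro bs ha hb h
      cases bs with
      | nil =>
          have := h (key a)
          simp at this
      | cons b bs =>
          rw [List.pairwise_cons] at ha hb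
          have hab : key a = key b := by
            by_contra hne
            rcases lt_or_gt_of_ne hne with hlt | hgt
            · have hk := h (key a)
              have hnil : (b :: bs).filter (fun x => key x == key a) = [] := by
                rw [List.filter_eq_nil_iff]
                intro c hc
                rcases List.mem_cons.mp hc with rfl | hc
                · simp; omega
                · have := hb.1 c hc; simp; omega
              rw [hnil] at hk
              simp at hk
            · have hk := h (key b)
              have hnil : (a :: as).filter (fun x => key x == key b) = [] := by
                rw [List.filter_eq_nil_iff]
                intro c hc
                rcases List.mem_cons.mp hc with rfl | hc
                · simp; omega
                · have := ha.1 c hc; simp; omega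
              rw [hnil] at hk
              simp at hk
          have hk := h (key a)
          rw [List.filter_cons_of_pos (by simp), List.filter_cons_of_pos (by simp [hab])] at hk
          rw [List.cons_eq_cons] at hk
          obtain ⟨rfl, htail⟩ := hk
          have htails : as = bs := by
            apply ih bs ha.2 hb.2
            intro k
            by_cases hke : key a = k
            · subst hke; exact htail
            · have hkk := h k
              rw [List.filter_cons_of_neg (by simp [hke]),
                  List.filter_cons_of_neg (by simp [hab ▸ hke])] at hkk
              exact hkk
          rw [htails]

theorem pv_flatMap_bucket {α : Type} (key : α → Int) (xs : List α) (K : List Int)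
    (hnd : K.Nodup) (k : Int) :
    (K.flatMap (fun j => xs.filter (fun x => key x == j))).filter (fun x => key x == k)
      = if k ∈ K then xs.filter (fun x => key x == k) else [] := by
  induction K with
  | nil => simp
  | cons j K ih =>
      rw [List.nodup_cons] at hnd
      rw [List.flatMap_cons, List.filter_append, ih hnd.2]
      by_cases hk : j = k
      · subst hk
        rw [List.filter_filter]
        simp only [Bool.and_self]
        rw [if_neg hnd.1, if_pos (List.mem_cons_self ..), List.append_nil]
      · have h1 : (List.filter (fun x => key x == j) xs).filter (fun x => key x == k) = [] := by
          rw [List.filter_filter, List.filter_eq_nil_iff]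
          intro c hc; simp; omega
        have h2 : ¬ k = j := fun h => hk h.symm
        rw [h1, List.nil_append]
        by_cases hm : k ∈ K <;> simp [hm, h2]

theorem pv_pairwise_flatMap {α : Type} (key : α → Int) (xs : List α) (K : List Int)
    (hK : K.Pairwise (· < ·)) :
    (K.flatMap (fun j => xs.filter (fun x => key x == j))).Pairwise
      (fun a b => key a ≤ key b) := by
  induction K with
  | nil => simp
  | cons j K ih =>
      rw [List.pairwise_cons] at hK
      rw [List.flatMap_cons, List.pairwise_append]
      refine ⟨?_, ih hK.2, ?_⟩
      · apply List.pairwise_of_forall_mem_list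
        intro a ha b hb
        have h1 := (List.mem_filter.mp ha).2
        have h2 := (List.mem_filter.mp hb).2
        simp at h1 h2; omega
      · intro a ha b hb
        have hka : key a = j := by simpa using (List.mem_filter.mp ha).2
        rcases List.mem_flatMap.mp hb with ⟨j', hj', hb'⟩
        have hkb : key b = j' := by simpa using (List.mem_filter.mp hb').2
        have := hK.1 j' hj'
        omega
theorem pv_filter_sorted {α : Type} (key : α → Int) (xs : List α) (k : Int) :
    (PySem.List.sorted xs key).filter (fun x => key x == k)
      = xs.filter (fun x => key x == k) := by
  induction xs using List.reverseRecOn with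
  | nil => simp [PySem.List.sorted_eq_foldl_insertBy]
  | append_singleton xs x ih =>
      have hfold : PySem.List.sorted (xs ++ [x]) key
          = PySem.List.insertBy (fun a b => decide (key a < key b)) x
              (PySem.List.sorted xs key) := by
        rw [PySem.List.sorted_eq_foldl_insertBy, PySem.List.sorted_eq_foldl_insertBy,
            List.foldl_append, List.foldl_cons, List.foldl_nil]
      rw [hfold, pv_filter_insertBy key x k _ (PySem.List.sorted_pairwise xs key), ih,
          List.filter_append]
      by_cases hk : key x = k <;> simp [hk]

theorem pv_sorted_eq_flatMap {α : Type} [BEq α] (key : α → Int) (xs : List α) :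
    PySem.List.sorted xs key
      = (PySem.List.sorted (PySem.Set.ofList (xs.map key)) (fun j => j)).flatMap
          (fun j => xs.filter (fun x => key x == j)) := by
  have hKlt := PySem.List.sorted_ofList_pairwise_lt (xs.map key)
  have hnd : (PySem.List.sorted (PySem.Set.ofList (xs.map key)) (fun j => j)).Nodup :=
    hKlt.imp (fun h => ne_of_lt h)
  apply pv_eq_of_pairwise_of_filters key
  · exact PySem.List.sorted_pairwise xs key
  · exact pv_pairwise_flatMap key xs _ hKlt
  · intro k
    rw [pv_filter_sorted, pv_flatMap_bucket key xs _ hnd k]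
    by_cases hm : k ∈ PySem.List.sorted (PySem.Set.ofList (xs.map key)) (fun j => j)
    · rw [if_pos hm]
    · rw [if_neg hm]
      have : ∀ x ∈ xs, ¬ key x = k := by
        intro x hx hkx
        apply hm
        rw [PySem.List.mem_sorted]
        exact (PySem.Set.mem_ofList _ _).mpr (hkx ▸ List.mem_map_of_mem hx)
      rw [List.filter_eq_nil_iff]
      intro c hc
      simpa using this c hc

theorem pv_ports_agree (fruitmand : List String) (fruit : String) :
    fruitstuk_toevoegen fruitmand fruit = fruitstuk_toevoegen_alt fruitmand fruit := by
  have hA : fruitstuk_toevoegen fruitmand fruit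
      = (PySem.List.sorted
          ((fruitmand.filter (fun s => decide (PySem.Str.len s ≠ PySem.Str.len fruit))).map
              (fun s => (s, PySem.Str.len s)) ++ [(fruit, PySem.Str.len fruit)])
          (fun p => p.2)).map (fun p => p.1) := by
    simp only [fruitstuk_toevoegen]
    rw [PySem.List.foldl_pyRange_zero_pyGetD fruitmand ""
          (fun acc s => if PySem.Str.len s ≠ PySem.Str.len fruit
                        then acc ++ [(s, PySem.Str.len s)] else acc) [],
        PySem.List.foldl_append_ite (fun s => PySem.Str.len s ≠ PySem.Str.len fruit)
          (fun s => (s, PySem.Str.len s)), List.nil_append]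
    rw [PySem.List.foldl_pyRange_zero_pyGetD _ ("", (0:Int)) (fun acc x => acc ++ [x.1]) [],
        PySem.List.foldl_append_singleton_eq_map, List.nil_append]
  have hB : fruitstuk_toevoegen_alt fruitmand fruit
      = (PySem.List.sorted
           (PySem.Set.ofList
             (((fruitmand.filter (fun s => decide (PySem.Str.len s ≠ PySem.Str.len fruit))).map
                 (fun s => (PySem.Str.len s, s)) ++ [(PySem.Str.len fruit, fruit)]).map (fun p => p.1)))
           (fun k => k)).flatMap
          (fun k =>
            ((((fruitmand.filter (fun s => decide (PySem.Str.len s ≠ PySem.Str.len fruit))).map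
                 (fun s => (PySem.Str.len s, s)) ++ [(PySem.Str.len fruit, fruit)]).filter
               (fun p => p.1 == k)).map (fun p => p.2))) := by
    simp only [fruitstuk_toevoegen_alt]
    rw [PySem.List.foldl_ite_eq_foldl_filter (fun naam => PySem.Str.len naam ≠ PySem.Str.len fruit)
          (fun (d : PySem.Dict Int (List String)) (naam : String) =>
            d.modify (PySem.Str.len naam) [] (· ++ [naam])) fruitmand PySem.Dict.empty]
    rw [show (fun (d : PySem.Dict Int (List String)) (naam : String) =>
              d.modify (PySem.Str.len naam) [] (· ++ [naam]))
          = (fun d naam => d.modify ((fun s => (PySem.Str.len s, s)) naam).1 []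
              (· ++ [((fun s => (PySem.Str.len s, s)) naam).2])) from rfl,
        ← List.foldl_map (f := fun s => (PySem.Str.len s, s))
          (g := fun (d : PySem.Dict Int (List String)) (p : Int × String) =>
            d.modify p.1 [] (· ++ [p.2]))]
    rw [show ((List.foldl (fun (d : PySem.Dict Int (List String)) (p : Int × String) =>
                  d.modify p.1 [] (· ++ [p.2])) PySem.Dict.empty
                ((fruitmand.filter (fun s => decide (PySem.Str.len s ≠ PySem.Str.len fruit))).map
                   (fun s => (PySem.Str.len s, s)))).modify (PySem.Str.len fruit) [] (· ++ [fruit]))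
          = List.foldl (fun (d : PySem.Dict Int (List String)) (p : Int × String) =>
              d.modify p.1 [] (· ++ [p.2])) PySem.Dict.empty
              ((fruitmand.filter (fun s => decide (PySem.Str.len s ≠ PySem.Str.len fruit))).map
                 (fun s => (PySem.Str.len s, s)) ++ [(PySem.Str.len fruit, fruit)]) by
          rw [List.foldl_append, List.foldl_cons, List.foldl_nil]]
    have hkeys : (List.foldl (fun (d : PySem.Dict Int (List String)) (p : Int × String) =>
              d.modify p.1 [] (· ++ [p.2])) PySem.Dict.empty
              ((fruitmand.filter (fun s => decide (PySem.Str.len s ≠ PySem.Str.len fruit))).map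
                 (fun s => (PySem.Str.len s, s)) ++ [(PySem.Str.len fruit, fruit)])).keys
        = PySem.Set.ofList
            (((fruitmand.filter (fun s => decide (PySem.Str.len s ≠ PySem.Str.len fruit))).map
                 (fun s => (PySem.Str.len s, s)) ++ [(PySem.Str.len fruit, fruit)]).map (fun p => p.1)) := by
      rw [show (fun (d : PySem.Dict Int (List String)) (p : Int × String) =>
                 d.modify p.1 [] (· ++ [p.2]))
            = (fun d p => d.modify ((fun q : Int × String => q.1) p) []
                ((fun (_ : PySem.Dict Int (List String)) (p : Int × String)
                     (v : List String) => v ++ [p.2]) d p)) from rfl,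
          PySem.Dict.keys_foldl_modify_key]
      rw [PySem.Dict.keys_empty, PySem.Set.update_eq_append_filter]
      simp [PySem.Set.contains]
    have hgetD : ∀ c : Int, (List.foldl (fun (d : PySem.Dict Int (List String)) (p : Int × String) =>
              d.modify p.1 [] (· ++ [p.2])) PySem.Dict.empty
              ((fruitmand.filter (fun s => decide (PySem.Str.len s ≠ PySem.Str.len fruit))).map
                 (fun s => (PySem.Str.len s, s)) ++ [(PySem.Str.len fruit, fruit)])).getD c []
        = ((((fruitmand.filter (fun s => decide (PySem.Str.len s ≠ PySem.Str.len fruit))).map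
                 (fun s => (PySem.Str.len s, s)) ++ [(PySem.Str.len fruit, fruit)]).filter
               (fun p => p.1 == c)).map (fun p => p.2)) := by
      intro c
      rw [PySem.Dict.getD_foldl_modify_append, PySem.Dict.getD_empty, List.nil_append]
    rw [hkeys]
    rw [PySem.List.foldl_append_eq_flatMap
          (fun k => (List.foldl (fun (d : PySem.Dict Int (List String)) (p : Int × String) =>
              d.modify p.1 [] (· ++ [p.2])) PySem.Dict.empty
              ((fruitmand.filter (fun s => decide (PySem.Str.len s ≠ PySem.Str.len fruit))).map
                 (fun s => (PySem.Str.len s, s)) ++ [(PySem.Str.len fruit, fruit)])).getD k []),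
        List.nil_append]
    exact List.flatMap_congr (fun k _ => hgetD k)
  rw [hA, hB, pv_sorted_eq_flatMap (fun p : String × Int => p.2), List.map_flatMap]
  have hkeq : (List.map (fun s => (s, PySem.Str.len s))
        (List.filter (fun s => decide (PySem.Str.len s ≠ PySem.Str.len fruit)) fruitmand) ++
      [(fruit, PySem.Str.len fruit)]).map (fun p : String × Int => p.2)
      = (List.map (fun s => (PySem.Str.len s, s))
          (List.filter (fun s => decide (PySem.Str.len s ≠ PySem.Str.len fruit)) fruitmand) ++
        [(PySem.Str.len fruit, fruit)]).map (fun p : Int × String => p.1) := by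
    simp [List.map_map, Function.comp]
  rw [hkeq]
  apply List.flatMap_congr
  intro k _
  simp only [List.filter_append, List.filter_map, List.map_append, List.map_map,
    List.filter_cons]
  by_cases hk : (fruit.length : Int) = k <;> simp [hk, Function.comp_def]

-- ===== VERDICT (by name: the statement is the Claim_ definition above) =====
theorem fruitstuk_toevoegen_spec : Claim_equal_fruitstuk_toevoegen := by
  intro fruitmand fruit _
  exact pv_ports_agree fruitmand fruit
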